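-- pv_equiv track=rewrite | github.com/emilianodesu/CPCFI_X_LCD | PrepWeek/Magno/Miercoles/decoding.py | decodificar_mensaje_sveta
-- ===== SOURCE A (Python) =====
-- def decodificar_mensaje_sveta(n, s):
--     palabra_original = [None] * n
--     izquierda = 0
--     derecha = n - 1
--
--     for i in range(n):
--         if i % 2 == 0:
--             palabra_original[izquierda] = s[i]
--             izquierda += 1
--         else:
--             palabra_original[derecha] = s[i]
--             derecha -= 1
--
--     return "".join(palabra_original)
-- ===== SOURCE B (Python) =====
-- def decodificar_mensaje_sveta(n, s):
--     front = [s[i] for i in range(0, n, 2)]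
--     back = [s[i] for i in range(1, n, 2)]
--     return "".join(front + back[::-1])
-- ===== Notes on version B (the rewrite author's own statement) =====
-- stated objective: simpler
-- what changed: Replaces the stateful two-pointer placement loop (writing alternately into the left and right end of a preallocated buffer) with two parity-separated index passes: collect even-indexed chars, collect odd-indexed chars, and concatenate the first with the reverse of the second.
import Mathlib
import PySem

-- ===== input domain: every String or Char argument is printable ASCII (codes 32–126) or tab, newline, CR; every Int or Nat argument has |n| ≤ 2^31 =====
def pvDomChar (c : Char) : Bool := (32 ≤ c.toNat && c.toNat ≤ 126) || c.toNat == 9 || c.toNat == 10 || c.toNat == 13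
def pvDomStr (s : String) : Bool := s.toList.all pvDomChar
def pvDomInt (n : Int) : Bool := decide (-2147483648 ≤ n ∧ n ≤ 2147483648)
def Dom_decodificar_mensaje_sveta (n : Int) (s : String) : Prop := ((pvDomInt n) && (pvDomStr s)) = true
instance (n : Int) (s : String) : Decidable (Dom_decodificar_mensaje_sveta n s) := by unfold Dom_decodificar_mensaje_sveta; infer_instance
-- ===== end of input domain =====

-- B builds the answer from two parity-separated index passes (even-indexed chars, then the
-- odd-indexed chars reversed) instead of A's single two-pointer placement loop; objective: simpler.

-- ===== PORT A =====
-- the body of A's for-loop, lifted to a named helper (s[i] ported as pyGetD: under Pre_ every index read is in range, so the default is never used)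
def pvStepA (t : List Char) (st : List (Option Char) × Int × Int) (i : Int) :
    List (Option Char) × Int × Int :=
  let (arr, izq, der) := st
  if i % 2 == 0 then
    (arr.set izq.toNat (some (PySem.List.pyGetD t i ' ')), izq + 1, der)
  else
    (arr.set der.toNat (some (PySem.List.pyGetD t i ' ')), izq, der - 1)


def decodificar_mensaje_sveta (n : Int) (s : String) : String :=
  let res := (PySem.List.pyRange 0 n 1).foldl (pvStepA s.toList)
    (List.replicate n.toNat none, 0, n - 1)
  String.ofList (res.1.filterMap id)

def decodificar_mensaje_sveta_alt (n : Int) (s : String) : String :=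
  let front := (PySem.List.pyRange 0 n 2).map (fun i => PySem.List.pyGetD s.toList i ' ')
  let back := (PySem.List.pyRange 1 n 2).map (fun i => PySem.List.pyGetD s.toList i ' ')
  String.ofList (front ++ back.reverse)


-- ===== PRECONDITION & SPEC =====
-- Python A raises IndexError when n > len(s) (it reads s[i] for every 0 ≤ i < n); those inputs are excluded.
def Pre_decodificar_mensaje_sveta (n : Int) (s : String) : Prop :=
  n ≤ PySem.Str.len s
instance (n : Int) (s : String) : Decidable (Pre_decodificar_mensaje_sveta n s) := by
  unfold Pre_decodificar_mensaje_sveta; infer_instance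
def pvWitness_decodificar_mensaje_sveta : Int × String := (4, "code")

def Spec_decodificar_mensaje_sveta (n : Int) (s : String) (out : String) : Prop := out = decodificar_mensaje_sveta_alt n s
instance (n : Int) (s : String) (out : String) : Decidable (Spec_decodificar_mensaje_sveta n s out) := by unfold Spec_decodificar_mensaje_sveta; infer_instance

-- ===== CLAIM (what is proved, stated in full; the proofs are below) =====
def Claim_equal_decodificar_mensaje_sveta : Prop := ∀ (n : Int) (s : String), Dom_decodificar_mensaje_sveta n s → Pre_decodificar_mensaje_sveta n s → Spec_decodificar_mensaje_sveta n s (decodificar_mensaje_sveta n s)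

-- ===== LEMMAS AND PROOFS =====

-- step-2 range bookkeeping
lemma pyRange_two_len_even (m : Nat) :
    (PySem.List.pyRange 0 (m : Int) 2).length = (m + 1) / 2 := by
  rw [PySem.List.pyRange_of_pos 0 (m : Int) (by norm_num)]
  simp only [List.length_map, List.length_range]
  split_ifs with h <;> omega

lemma pyRange_two_len_odd (m : Nat) :
    (PySem.List.pyRange 1 (m : Int) 2).length = m / 2 := by
  rw [PySem.List.pyRange_of_pos 1 (m : Int) (by norm_num)]
  simp only [List.length_map, List.length_range]
  split_ifs with h <;> omega

lemma pyRange_two_succ_even (m : Nat) (h : m % 2 = 0) :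
    PySem.List.pyRange 0 ((m : Int) + 1) 2 = PySem.List.pyRange 0 (m : Int) 2 ++ [(m : Int)] := by
  rw [PySem.List.pyRange_of_pos 0 ((m : Int) + 1) (by norm_num),
      PySem.List.pyRange_of_pos 0 (m : Int) (by norm_num)]
  have h1 : (if (0 : Int) < (m : Int) + 1 then (((m : Int) + 1 - 0 + 2 - 1) / 2).toNat else 0)
      = m / 2 + 1 := by split_ifs with hh <;> omega
  have h2 : (if (0 : Int) < (m : Int) then (((m : Int) - 0 + 2 - 1) / 2).toNat else 0)
      = m / 2 := by split_ifs with hh <;> omega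
  rw [h1, h2, List.range_succ, List.map_append]
  have h3 : (0:Int) + 2 * ((m/2 : Nat) : Int) = (m : Int) := by omega
  rw [List.map_cons, List.map_nil, h3]

lemma pyRange_two_succ_even' (m : Nat) (h : m % 2 = 0) :
    PySem.List.pyRange 1 ((m : Int) + 1) 2 = PySem.List.pyRange 1 (m : Int) 2 := by
  rw [PySem.List.pyRange_of_pos 1 ((m : Int) + 1) (by norm_num),
      PySem.List.pyRange_of_pos 1 (m : Int) (by norm_num)]
  have h1 : (if (1 : Int) < (m : Int) + 1 then (((m : Int) + 1 - 1 + 2 - 1) / 2).toNat else 0)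
      = (if (1 : Int) < (m : Int) then (((m : Int) - 1 + 2 - 1) / 2).toNat else 0) := by
    split_ifs with hh1 hh2 <;> omega
  rw [h1]

lemma pyRange_two_succ_odd (m : Nat) (h : m % 2 = 1) :
    PySem.List.pyRange 1 ((m : Int) + 1) 2 = PySem.List.pyRange 1 (m : Int) 2 ++ [(m : Int)] := by
  rw [PySem.List.pyRange_of_pos 1 ((m : Int) + 1) (by norm_num),
      PySem.List.pyRange_of_pos 1 (m : Int) (by norm_num)]
  have h1 : (if (1 : Int) < (m : Int) + 1 then (((m : Int) + 1 - 1 + 2 - 1) / 2).toNat else 0)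
      = m / 2 + 1 := by split_ifs with hh <;> omega
  have h2 : (if (1 : Int) < (m : Int) then (((m : Int) - 1 + 2 - 1) / 2).toNat else 0)
      = m / 2 := by split_ifs with hh <;> omega
  rw [h1, h2, List.range_succ, List.map_append]
  have h3 : (1:Int) + 2 * ((m/2 : Nat) : Int) = (m : Int) := by omega
  rw [List.map_cons, List.map_nil, h3]

lemma pyRange_two_succ_odd' (m : Nat) (h : m % 2 = 1) :
    PySem.List.pyRange 0 ((m : Int) + 1) 2 = PySem.List.pyRange 0 (m : Int) 2 := by
  rw [PySem.List.pyRange_of_pos 0 ((m : Int) + 1) (by norm_num),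
      PySem.List.pyRange_of_pos 0 (m : Int) (by norm_num)]
  have h1 : (if (0 : Int) < (m : Int) + 1 then (((m : Int) + 1 - 0 + 2 - 1) / 2).toNat else 0)
      = (if (0 : Int) < (m : Int) then (((m : Int) - 0 + 2 - 1) / 2).toNat else 0) := by
    split_ifs with hh1 hh2 <;> omega
  rw [h1]

lemma pvStepA_invariant (t : List Char) (N : Nat) :
    ∀ m : Nat, m ≤ N →
    (PySem.List.pyRange 0 (m : Int) 1).foldl (pvStepA t)
        (List.replicate N none, 0, (N : Int) - 1)
    = ( ((PySem.List.pyRange 0 (m : Int) 2).map (fun i => some (PySem.List.pyGetD t i ' ')))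
          ++ List.replicate (N - m) none
          ++ ((PySem.List.pyRange 1 (m : Int) 2).map (fun i => some (PySem.List.pyGetD t i ' '))).reverse,
        (((PySem.List.pyRange 0 (m : Int) 2).length : Int)),
        (N : Int) - 1 - ((PySem.List.pyRange 1 (m : Int) 2).length : Int) ) := by
  intro m
  induction m with
  | zero =>
    intro _
    simp [PySem.List.pyRange_of_pos]
  | succ m ih =>
    intro hm
    have hm' : m ≤ N := by omega
    have hcast : ((m + 1 : Nat) : Int) = (m : Int) + 1 := by push_cast; ring
    rw [hcast, PySem.List.pyRange_one_succ_right (by omega : (0:Int) ≤ (m:Int)),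
        List.foldl_append, ih hm']
    have hlenE : (PySem.List.pyRange 0 (m : Int) 2).length = (m + 1) / 2 :=
      pyRange_two_len_even m
    have hlenO : (PySem.List.pyRange 1 (m : Int) 2).length = m / 2 :=
      pyRange_two_len_odd m
    rcases Nat.even_or_odd m with he | ho
    · have hmod : m % 2 = 0 := Nat.even_iff.mp he
      have hmod' : ((m : Int)) % 2 = 0 := by omega
      rw [pyRange_two_succ_even m hmod, pyRange_two_succ_even' m hmod]
      simp only [List.foldl_cons, List.foldl_nil, pvStepA, beq_iff_eq, hmod', if_pos]
      have hrep : List.replicate (N - m) (none : Option Char)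
          = none :: List.replicate (N - (m + 1)) none := by
        have h5 : N - m = (N - (m + 1)) + 1 := by omega
        rw [h5, List.replicate_succ]
      have hL : (PySem.List.pyRange 0 (m : Int) 2).length
          = (List.map (fun i => some (PySem.List.pyGetD t i ' ')) (PySem.List.pyRange 0 (m : Int) 2)).length := by
        rw [List.length_map]
      have hlt : (List.map (fun i => some (PySem.List.pyGetD t i ' ')) (PySem.List.pyRange 0 (m : Int) 2)).length
          < ((List.map (fun i => some (PySem.List.pyGetD t i ' ')) (PySem.List.pyRange 0 (m : Int) 2))
              ++ List.replicate (N - m) (none : Option Char)).length := by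
        simp only [List.length_append, List.length_replicate]
        omega
      rw [Int.toNat_natCast, hL, List.set_append_left _ _ hlt,
          List.set_append_right _ _ (le_refl _), Nat.sub_self, hrep, List.set_cons_zero]
      simp only [List.map_append, List.map_cons, List.map_nil, List.length_append,
        List.length_map, List.length_cons, List.length_nil, List.append_assoc,
        List.cons_append, Prod.mk.injEq, and_true]
      constructor
      · rw [List.nil_append]
      · push_cast
        ring
    · have hmod : m % 2 = 1 := Nat.odd_iff.mp ho
      have hmod' : ((m : Int)) % 2 = 1 := by omega
      rw [pyRange_two_succ_odd m hmod, pyRange_two_succ_odd' m hmod]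
      simp only [List.foldl_cons, List.foldl_nil, pvStepA, beq_iff_eq, hmod']
      rw [if_neg (by norm_num : ¬ ((1:Int)) = 0)]
      have hidx : ((N : Int) - 1 - ((PySem.List.pyRange 1 (m : Int) 2).length : Int)).toNat
          = N - 1 - m / 2 := by rw [hlenO]; omega
      have hrep : List.replicate (N - m) (none : Option Char)
          = List.replicate (N - (m + 1)) none ++ [none] := by
        have h5 : N - m = (N - (m + 1)) + 1 := by omega
        rw [h5, List.replicate_succ']
      have hlt : N - 1 - m / 2
          < ((List.map (fun i => some (PySem.List.pyGetD t i ' ')) (PySem.List.pyRange 0 (m : Int) 2))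
              ++ List.replicate (N - m) (none : Option Char)).length := by
        simp only [List.length_append, List.length_map, List.length_replicate, hlenE]
        omega
      have hge : (List.map (fun i => some (PySem.List.pyGetD t i ' ')) (PySem.List.pyRange 0 (m : Int) 2)).length
          ≤ N - 1 - m / 2 := by
        simp only [List.length_map, hlenE]
        omega
      rw [hidx, List.set_append_left _ _ hlt, List.set_append_right _ _ hge, hrep]
      have hge2 : (List.replicate (N - (m + 1)) (none : Option Char)).length
          ≤ N - 1 - m / 2 - (List.map (fun i => some (PySem.List.pyGetD t i ' ')) (PySem.List.pyRange 0 (m : Int) 2)).length := by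
        simp only [List.length_map, List.length_replicate, hlenE]
        omega
      rw [List.set_append_right _ _ hge2]
      have hidx2 : N - 1 - m / 2 - (List.map (fun i => some (PySem.List.pyGetD t i ' ')) (PySem.List.pyRange 0 (m : Int) 2)).length
          - (List.replicate (N - (m + 1)) (none : Option Char)).length = 0 := by
        simp only [List.length_map, List.length_replicate, hlenE]
        omega
      rw [hidx2, List.set_cons_zero]
      simp only [List.map_append, List.map_cons, List.map_nil, List.reverse_append,
        List.reverse_cons, List.reverse_nil, List.nil_append, List.append_assoc,
        List.cons_append, List.length_append, List.length_cons,
        List.length_nil, Prod.mk.injEq, true_and]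
      push_cast
      ring

-- ===== VERDICT (by name: the statement is the Claim_ definition above) =====
theorem decodificar_mensaje_sveta_spec : Claim_equal_decodificar_mensaje_sveta := by
  intro n s _ _
  unfold Spec_decodificar_mensaje_sveta decodificar_mensaje_sveta decodificar_mensaje_sveta_alt
  rcases (by omega : n ≤ 0 ∨ 0 < n) with hn | hn
  · rw [PySem.List.pyRange_one_eq_nil hn,
        PySem.List.pyRange_of_pos 0 n (by norm_num),
        PySem.List.pyRange_of_pos 1 n (by norm_num)]
    rw [if_neg (by omega), if_neg (by omega)]
    simp [Int.toNat_of_nonpos hn]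
  · have hN : n = ((n.toNat : Nat) : Int) := by omega
    rw [hN]
    have hinv := pvStepA_invariant s.toList n.toNat n.toNat le_rfl
    simp only [Int.toNat_natCast]
    rw [hinv]
    simp [List.filterMap_append, List.filterMap_reverse, List.filterMap_map]
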